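-- pv_equiv track=rewrite | github.com/navicor90/challenges | sort_logs.py | minor_words_set
-- ===== SOURCE A (Python) =====
-- def minor_words_set(words1, words2):
--     if len(words1) == 0 or len(words2) == 0:
--         return 0
--     elif words1[0] < words2[0]:
--         return 1
--     elif words1[0] > words2[0]:
--         return 2
--     elif words1[0] == words2[0]:
--         return minor_words_set(words1[1:],words2[1:])
-- ===== SOURCE B (Python) =====
-- def minor_words_set(words1, words2):
--     for a, b in zip(words1, words2):
--         if a < b:
--             return 1
--         elif a > b:
--             return 2
--     return 0
-- ===== Notes on version B (the rewrite author's own statement) =====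
-- stated objective: faster
-- what changed: Replaces the slicing recursion with a single iterative loop over zip(words1, words2), returning at the first differing pair and 0 when either list is exhausted.
import Mathlib
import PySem

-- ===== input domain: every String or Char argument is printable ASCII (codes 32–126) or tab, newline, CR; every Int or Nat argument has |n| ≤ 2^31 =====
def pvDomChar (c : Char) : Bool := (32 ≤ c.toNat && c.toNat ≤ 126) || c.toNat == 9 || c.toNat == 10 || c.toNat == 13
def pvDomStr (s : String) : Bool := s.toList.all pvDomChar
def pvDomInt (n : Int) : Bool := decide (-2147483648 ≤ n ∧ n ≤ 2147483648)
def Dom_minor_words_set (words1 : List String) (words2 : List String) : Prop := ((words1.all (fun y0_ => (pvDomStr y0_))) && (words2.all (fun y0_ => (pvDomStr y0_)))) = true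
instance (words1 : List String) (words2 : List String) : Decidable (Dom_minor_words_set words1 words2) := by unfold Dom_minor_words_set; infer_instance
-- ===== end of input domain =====

-- ===== PORT A =====
-- A: recursion peeling the heads; the final `elif ==` always holds for strings
-- (total order), so Python's fall-through None is unreachable.
def minor_words_set (words1 : List String) (words2 : List String) : Int :=
  match words1, words2 with
  | [], _ => 0
  | _, [] => 0
  | a :: t1, b :: t2 =>
    if a < b then 1
    else if a > b then 2
    else minor_words_set t1 t2

-- ===== PORT B =====
-- B: one iterative pass over the zipped pairs, no slicing.
def mwsLoop : List (String × String) → Int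
  | [] => 0
  | (a, b) :: rest =>
    if a < b then 1
    else if a > b then 2
    else mwsLoop rest

def minor_words_set_alt (words1 : List String) (words2 : List String) : Int :=
  mwsLoop (words1.zip words2)

-- ===== PRECONDITION & SPEC =====
def Spec_minor_words_set (words1 : List String) (words2 : List String) (out : Int) : Prop := out = minor_words_set_alt words1 words2
instance (words1 : List String) (words2 : List String) (out : Int) : Decidable (Spec_minor_words_set words1 words2 out) := by unfold Spec_minor_words_set; infer_instance

-- ===== CLAIM (what is proved, stated in full; the proofs are below) =====
def Claim_equal_minor_words_set : Prop := ∀ (words1 : List String) (words2 : List String), Dom_minor_words_set words1 words2 → Spec_minor_words_set words1 words2 (minor_words_set words1 words2)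

-- ===== LEMMAS AND PROOFS =====

-- ===== VERDICT (by name: the statement is the Claim_ definition above) =====
theorem mws_eq_loop : ∀ (w1 w2 : List String), minor_words_set w1 w2 = mwsLoop (w1.zip w2)
  | [], _ => by simp [minor_words_set, mwsLoop]
  | _ :: _, [] => by simp [minor_words_set, mwsLoop]
  | a :: t1, b :: t2 => by
    simp only [minor_words_set, List.zip_cons_cons, mwsLoop]
    split_ifs <;> first | rfl | exact mws_eq_loop t1 t2

theorem minor_words_set_spec : Claim_equal_minor_words_set := by
  intro w1 w2 _
  exact mws_eq_loop w1 w2
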